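-- pv_equiv track=rewrite | github.com/zhanglabtools/ConsTADs | ConsTADs/TadSeparationLandscape.py | __get_bin_name_list_for_chr
-- ===== SOURCE A (Python) =====
-- def __get_bin_name_list_for_chr(chr_length, chr_symbol, resolution):
--      start_pos = 0
--      start = []
--      end = []
--      bin_name_chr = []
--      while (start_pos + resolution) <= chr_length:
--           start.append(start_pos)
--           end.append(start_pos + resolution)
--           start_pos += resolution
--      start.append(start_pos)
--      end.append(chr_length)
--      for i in range(len(start)):
--           bin_name_chr.append(chr_symbol + ':' + str(start[i]) + '-' + str(end[i]))
--      return bin_name_chr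
-- ===== SOURCE B (Python) =====
-- def __get_bin_name_list_for_chr(chr_length, chr_symbol, resolution):
--     m = max(chr_length // resolution, 0)
--     bins = [f"{chr_symbol}:{i * resolution}-{(i + 1) * resolution}" for i in range(m)]
--     bins.append(f"{chr_symbol}:{m * resolution}-{chr_length}")
--     return bins
-- ===== Notes on version B (the rewrite author's own statement) =====
-- stated objective: simpler
-- what changed: Replaces the while loop that discovers the bin count by repeated addition (building separate start/end lists, then a second indexing pass) with a closed-form count m = chr_length // resolution and a single comprehension emitting each bin string directly, plus the one trailing bin.
-- outside the precondition, e.g. on __get_bin_name_list_for_chr(-5, 'c', -2): A returns ['c:0--5'], B returns ['c:0--2', 'c:-2--4', 'c:-4--5']; on __get_bin_name_list_for_chr(-1, 'x', 0): A returns ['x:0--1'], B raises ZeroDivisionError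
import Mathlib
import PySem

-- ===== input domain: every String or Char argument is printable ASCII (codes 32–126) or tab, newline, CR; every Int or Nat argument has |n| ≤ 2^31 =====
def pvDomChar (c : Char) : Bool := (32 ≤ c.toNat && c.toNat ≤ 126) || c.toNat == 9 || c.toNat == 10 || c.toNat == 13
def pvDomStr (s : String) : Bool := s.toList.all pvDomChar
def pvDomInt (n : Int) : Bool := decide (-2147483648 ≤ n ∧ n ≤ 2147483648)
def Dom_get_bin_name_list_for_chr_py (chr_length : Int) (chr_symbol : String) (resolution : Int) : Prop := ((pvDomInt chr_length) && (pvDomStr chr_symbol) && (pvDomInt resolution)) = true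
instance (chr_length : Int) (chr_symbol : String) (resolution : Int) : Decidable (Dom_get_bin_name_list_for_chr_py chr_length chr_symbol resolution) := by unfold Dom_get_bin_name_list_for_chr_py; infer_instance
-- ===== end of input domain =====

-- B replaces A's while loop (which discovers the bin count by repeated addition and fills
-- separate start/end lists, then a second indexing pass) by a closed-form bin count
-- m = chr_length // resolution and one direct comprehension; objective: simpler.

-- ===== PORT A =====
-- the while loop; the '0 < resolution' conjunct only makes the recursion total
-- (on resolution ≤ 0 with resolution ≤ chr_length the Python loop never terminates; outside Pre_)
def pvLoopA (L res : Int) (p : Int) (s e : List Int) : List Int × List Int × Int :=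
  if _h : p + res ≤ L ∧ 0 < res then
    pvLoopA L res (p + res) (s ++ [p]) (e ++ [p + res])
  else (s, e, p)
termination_by (L - p).toNat
decreasing_by omega

def get_bin_name_list_for_chr_py (chr_length : Int) (chr_symbol : String) (resolution : Int) : List String :=
  let r := pvLoopA chr_length resolution 0 [] []
  let start := r.1 ++ [r.2.2]
  let fin := r.2.1 ++ [chr_length]
  (PySem.List.pyRange 0 (start.length : Int) 1).foldl
    (fun acc i => acc ++ [chr_symbol ++ ":" ++ PySem.Int.toStr (PySem.List.pyGetD start i 0)
                          ++ "-" ++ PySem.Int.toStr (PySem.List.pyGetD fin i 0)]) []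

-- ===== PORT B =====
def get_bin_name_list_for_chr_py_alt (chr_length : Int) (chr_symbol : String) (resolution : Int) : List String :=
  let m := max (PySem.Int.floordiv chr_length resolution) 0
  ((PySem.List.pyRange 0 m 1).map
      (fun i => chr_symbol ++ ":" ++ PySem.Int.toStr (i * resolution)
                ++ "-" ++ PySem.Int.toStr ((i + 1) * resolution)))
  ++ [chr_symbol ++ ":" ++ PySem.Int.toStr (m * resolution) ++ "-" ++ PySem.Int.toStr chr_length]

-- ===== PRECONDITION & SPEC =====
-- Pre_ excludes non-positive resolution: there Python A loops forever when resolution ≤ chr_length,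
-- and when chr_length < resolution ≤ 0 it returns one degenerate bin that is an accident of the loop
-- guard and which B's floor-division bin count does not (and should not) reproduce (B raises on resolution = 0).
def Pre_get_bin_name_list_for_chr_py (chr_length : Int) (chr_symbol : String) (resolution : Int) : Prop :=
  0 < resolution
instance (chr_length : Int) (chr_symbol : String) (resolution : Int) : Decidable (Pre_get_bin_name_list_for_chr_py chr_length chr_symbol resolution) := by unfold Pre_get_bin_name_list_for_chr_py; infer_instance

def pvWitness_get_bin_name_list_for_chr_py : Int × String × Int := (10, "chr1", 3)

def Spec_get_bin_name_list_for_chr_py (chr_length : Int) (chr_symbol : String) (resolution : Int) (out : List String) : Prop := out = get_bin_name_list_for_chr_py_alt chr_length chr_symbol resolution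
instance (chr_length : Int) (chr_symbol : String) (resolution : Int) (out : List String) : Decidable (Spec_get_bin_name_list_for_chr_py chr_length chr_symbol resolution out) := by unfold Spec_get_bin_name_list_for_chr_py; infer_instance

-- ===== CLAIM (what is proved, stated in full; the proofs are below) =====
def Claim_equal_get_bin_name_list_for_chr_py : Prop := ∀ (chr_length : Int) (chr_symbol : String) (resolution : Int), Dom_get_bin_name_list_for_chr_py chr_length chr_symbol resolution → Pre_get_bin_name_list_for_chr_py chr_length chr_symbol resolution → Spec_get_bin_name_list_for_chr_py chr_length chr_symbol resolution (get_bin_name_list_for_chr_py chr_length chr_symbol resolution)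

-- ===== LEMMAS AND PROOFS =====

-- number of iterations of A's while loop from position p (resolution positive)
def pvCnt (L res p : Int) : Nat := (PySem.Int.floordiv (L - p) res).toNat

lemma pvCnt_succ (L res p : Int) (hr : 0 < res) (h : p + res ≤ L) :
    pvCnt L res p = pvCnt L res (p + res) + 1 := by
  unfold pvCnt
  rw [PySem.Int.floordiv_eq_ediv_of_pos hr, PySem.Int.floordiv_eq_ediv_of_pos hr]
  have h1 : L - p = (L - (p + res)) + 1 * res := by ring
  rw [h1, Int.add_mul_ediv_right _ _ (by omega : res ≠ 0)]
  have h2 : 0 ≤ (L - (p + res)) / res := Int.ediv_nonneg (by omega) (by omega)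
  omega

lemma pvCnt_zero (L res p : Int) (hr : 0 < res) (h : ¬ p + res ≤ L) :
    pvCnt L res p = 0 := by
  unfold pvCnt
  have := (PySem.Int.floordiv_lt_iff_lt_mul (a := L - p) (b := res) (q := 1) hr).mpr (by omega)
  omega

lemma pvShiftMap (p res : Int) (n : Nat) :
    (List.range (n + 1)).map (fun t : Nat => p + (t : Int) * res)
      = p :: (List.range n).map (fun t : Nat => (p + res) + (t : Int) * res) := by
  rw [List.range_succ_eq_map, List.map_cons, List.map_map]
  refine congrArg₂ _ (by simp) ?_
  apply List.map_congr_left; intro t _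
  simp only [Function.comp_apply, Nat.succ_eq_add_one]
  push_cast; ring

lemma pvShiftMap' (p res : Int) (n : Nat) :
    (List.range (n + 1)).map (fun t : Nat => p + ((t : Int) + 1) * res)
      = (p + res) :: (List.range n).map (fun t : Nat => (p + res) + ((t : Int) + 1) * res) := by
  rw [List.range_succ_eq_map, List.map_cons, List.map_map]
  refine congrArg₂ _ (by push_cast; ring) ?_
  apply List.map_congr_left; intro t _
  simp only [Function.comp_apply, Nat.succ_eq_add_one]
  push_cast; ring

lemma pvLoopA_spec (L res : Int) (hr : 0 < res) :
    ∀ p s e, pvLoopA L res p s e =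
      (s ++ (List.range (pvCnt L res p)).map (fun t : Nat => p + (t : Int) * res),
       e ++ (List.range (pvCnt L res p)).map (fun t : Nat => p + ((t : Int) + 1) * res),
       p + (pvCnt L res p : Int) * res) := by
  intro p s e
  induction p, s, e using pvLoopA.induct L res with
  | case1 p s e h ih =>
      rw [pvLoopA, dif_pos h, ih, pvCnt_succ L res p hr h.1, pvShiftMap, pvShiftMap']
      refine Prod.ext ?_ (Prod.ext ?_ ?_)
      · simp
      · simp
      · simp only []; push_cast; ring
  | case2 p s e h =>
      rw [pvLoopA, dif_neg h]
      have h' : ¬ p + res ≤ L := by tauto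
      rw [pvCnt_zero L res p hr h']
      simp

-- the indexing for-loop over two equal-length lists is zipWith
lemma pvFoldl_range_getD (g : Int → Int → String) :
    ∀ (s e : List Int) (acc : List String), s.length = e.length →
      (List.range s.length).foldl (fun acc k => acc ++ [g (s.getD k 0) (e.getD k 0)]) acc
        = acc ++ List.zipWith g s e := by
  intro s
  induction s with
  | nil => intro e acc h; simp
  | cons a s ih =>
      intro e acc h
      cases e with
      | nil => simp at h
      | cons b e =>
          simp only [List.length_cons, List.range_succ_eq_map, List.foldl_cons, List.foldl_map,
            List.getD_cons_zero, List.getD_cons_succ, List.zipWith_cons_cons]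
          rw [ih e (acc ++ [g a b]) (by simpa using h)]
          simp

lemma pvZipWith_map_range (g : Int → Int → String) (f1 f2 : Nat → Int) (n : Nat) :
    List.zipWith g ((List.range n).map f1) ((List.range n).map f2)
      = (List.range n).map (fun k => g (f1 k) (f2 k)) := by
  induction n with
  | zero => simp
  | succ n ih =>
      rw [List.range_succ, List.map_append, List.map_append,
        List.zipWith_append (h := by simp), ih]
      simp

-- ===== VERDICT (by name: the statement is the Claim_ definition above) =====
theorem get_bin_name_list_for_chr_py_spec : Claim_equal_get_bin_name_list_for_chr_py := by
  intro L sym res _hd hr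
  unfold Spec_get_bin_name_list_for_chr_py
  unfold get_bin_name_list_for_chr_py get_bin_name_list_for_chr_py_alt
  rw [pvLoopA_spec L res hr 0 [] []]
  simp only [List.nil_append, zero_add]
  have hm : max (PySem.Int.floordiv L res) 0 = ((pvCnt L res 0 : Nat) : Int) := by
    unfold pvCnt
    rw [Int.toNat_eq_max]
    norm_num
  rw [hm]
  set n := pvCnt L res 0 with hn
  have hlen : ((List.range n).map (fun t : Nat => (t : Int) * res) ++ [(n : Int) * res]).length
      = n + 1 := by simp
  rw [hlen]
  rw [PySem.List.pyRange_one, PySem.List.pyRange_one]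
  simp only [Int.sub_zero, Int.toNat_natCast, List.foldl_map, List.map_map, zero_add,
    PySem.List.pyGetD_natCast]
  rw [show n + 1 = ((List.range n).map (fun t : Nat => (t : Int) * res) ++ [(n : Int) * res]).length
        from hlen.symm]
  rw [pvFoldl_range_getD (fun a b => sym ++ ":" ++ PySem.Int.toStr a ++ "-" ++ PySem.Int.toStr b)
        _ _ [] (by simp)]
  rw [List.zipWith_append (h := by simp), pvZipWith_map_range]
  simp
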